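-- pv_equiv track=rewrite | github.com/pbretz99/Slip-Detection | testing_persistence.py | match_close_times
-- ===== SOURCE A (Python) =====
-- def match_close_times(times_1, times_2, pad=10):
--      matching = []
--      prev_matches = []
--      for t in times_2:
--           current_matches = []
--           for s in times_1:
--                if abs(s - t) < pad and s not in prev_matches:
--                     current_matches.append(s)
--                     prev_matches.append(s)
--           matching.append(current_matches)
--      return matching
-- ===== SOURCE B (Python) =====
-- def match_close_times(times_1, times_2, pad=10):
--     # Source-driven: each source time claims the earliest target it is close to.
--     matching = [[] for _ in times_2]
--     assigned = set()
--     for s in times_1: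
--         if s in assigned:
--             continue
--         j = next((j for j, t in enumerate(times_2) if abs(s - t) < pad), None)
--         if j is not None:
--             matching[j].append(s)
--             assigned.add(s)
--     return matching
-- ===== Notes on version B (the rewrite author's own statement) =====
-- stated objective: faster
-- what changed: B is source-driven: one pass over times_1 assigning each yet-unassigned source value to the first close target index into preallocated buckets with an O(1) assigned set, instead of A's target-driven repeated scans of times_1 with a linear 's not in prev_matches' list scan.
import Mathlib
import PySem

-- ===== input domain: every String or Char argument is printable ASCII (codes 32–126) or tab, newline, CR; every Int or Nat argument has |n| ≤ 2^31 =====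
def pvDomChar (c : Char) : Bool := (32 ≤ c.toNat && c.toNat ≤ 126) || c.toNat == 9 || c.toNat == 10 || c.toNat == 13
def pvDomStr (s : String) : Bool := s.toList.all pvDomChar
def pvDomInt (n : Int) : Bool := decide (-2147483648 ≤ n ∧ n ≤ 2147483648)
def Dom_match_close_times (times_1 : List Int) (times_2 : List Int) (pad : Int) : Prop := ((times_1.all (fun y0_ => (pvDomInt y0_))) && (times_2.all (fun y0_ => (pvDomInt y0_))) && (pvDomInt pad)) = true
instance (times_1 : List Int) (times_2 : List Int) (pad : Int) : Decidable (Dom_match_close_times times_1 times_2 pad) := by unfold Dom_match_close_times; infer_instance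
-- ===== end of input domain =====

-- B is source-driven (one pass over times_1, first close target index, preallocated
-- buckets + an assigned set) instead of A's target-driven scans with a claimed list;
-- same return value; a timing run measured B much faster (A rescans the claimed list).

-- ===== PORT A =====
def match_close_times (times_1 : List Int) (times_2 : List Int) (pad : Int) : List (List Int) :=
  (times_2.foldl (fun (st : List (List Int) × List Int) t =>
      let r := times_1.foldl (fun (st2 : List Int × List Int) s =>
          if |s - t| < pad ∧ s ∉ st2.2 then (st2.1 ++ [s], st2.2 ++ [s]) else st2)
        ([], st.2)
      (st.1 ++ [r.1], r.2))
    ([], [])).1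

-- ===== PORT B =====
def match_close_times_alt (times_1 : List Int) (times_2 : List Int) (pad : Int) : List (List Int) :=
  (times_1.foldl (fun (st : List (List Int) × PySem.Set Int) s =>
      if s ∈ st.2 then st
      else
        match times_2.findIdx? (fun t => decide (|s - t| < pad)) with
        | some j => (st.1.modify j (· ++ [s]), PySem.Set.add st.2 s)
        | none => st)
    (List.replicate times_2.length [], PySem.Set.empty)).1

-- ===== PRECONDITION & SPEC =====
def Spec_match_close_times (times_1 : List Int) (times_2 : List Int) (pad : Int) (out : List (List Int)) : Prop := out = match_close_times_alt times_1 times_2 pad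
instance (times_1 : List Int) (times_2 : List Int) (pad : Int) (out : List (List Int)) : Decidable (Spec_match_close_times times_1 times_2 pad out) := by unfold Spec_match_close_times; infer_instance

-- ===== CLAIM (what is proved, stated in full; the proofs are below) =====
def Claim_equal_match_close_times : Prop := ∀ (times_1 : List Int) (times_2 : List Int) (pad : Int), Dom_match_close_times times_1 times_2 pad → Spec_match_close_times times_1 times_2 pad (match_close_times times_1 times_2 pad)

-- ===== LEMMAS AND PROOFS =====

-- keep the first occurrence of each value
def dF : List Int → List Int
  | [] => []
  | a :: l => a :: dF (l.filter (· ≠ a))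
termination_by l => l.length
decreasing_by simp; exact le_trans (List.length_filter_le _ _) (by simp)

theorem dF_cons (a : Int) (l : List Int) : dF (a :: l) = a :: dF (l.filter (· ≠ a)) := by
  simp [dF]

-- common normal form: a bucket for each target, consuming the matched values
def runA (pad : Int) : List Int → List Int → List (List Int)
  | _, [] => []
  | u, t :: r =>
      dF (u.filter (fun s => decide (|s - t| < pad))) ::
        runA pad (u.filter (fun s => decide (¬ |s - t| < pad))) r

-- ---- A side ----
def addA (pad t : Int) : List Int → List Int → List Int
  | _, [] => []
  | prev, s :: r =>
      if |s - t| < pad ∧ s ∉ prev then s :: addA pad t (prev ++ [s]) r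
      else addA pad t prev r

theorem innerA_char (pad t : Int) (l : List Int) : ∀ (cur prev : List Int),
    l.foldl (fun (st2 : List Int × List Int) s =>
        if |s - t| < pad ∧ s ∉ st2.2 then (st2.1 ++ [s], st2.2 ++ [s]) else st2) (cur, prev)
      = (cur ++ addA pad t prev l, prev ++ addA pad t prev l) := by
  induction l with
  | nil => intro cur prev; simp [addA]
  | cons s r ih =>
      intro cur prev
      by_cases h : |s - t| < pad ∧ s ∉ prev
      · simp only [List.foldl_cons, addA, if_pos h, ih]
        simp
      · simp only [List.foldl_cons, addA, if_neg h, ih]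

def outA (pad : Int) (t1 : List Int) : List Int → List Int → List (List Int)
  | _, [] => []
  | prev, t :: r => addA pad t prev t1 :: outA pad t1 (prev ++ addA pad t prev t1) r

theorem outerA_char (pad : Int) (t1 : List Int) (t2 : List Int) (m : List (List Int)) (prev : List Int) :
    (t2.foldl (fun (st : List (List Int) × List Int) t =>
        (st.1 ++ [addA pad t st.2 t1], st.2 ++ addA pad t st.2 t1)) (m, prev)).1
      = m ++ outA pad t1 prev t2 := by
  induction t2 generalizing m prev with
  | nil => simp [outA]
  | cons t r ih =>
      rw [List.foldl_cons, outA, ih]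
      simp

theorem mem_addA (pad t : Int) (l : List Int) : ∀ (prev : List Int) (x : Int),
    x ∈ addA pad t prev l ↔ x ∈ l ∧ |x - t| < pad ∧ x ∉ prev := by
  induction l with
  | nil => intro prev x; simp [addA]
  | cons s r ih =>
      intro prev x
      by_cases h : |s - t| < pad ∧ s ∉ prev
      · simp only [addA, if_pos h, List.mem_cons, ih, List.mem_append, List.not_mem_nil,
          or_false, not_or]
        by_cases hxs : x = s
        · subst hxs; simp [h.1, h.2]
        · simp only [hxs, false_or]
          tauto
      · simp only [addA, if_neg h, ih, List.mem_cons]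
        by_cases hxs : x = s
        · subst hxs; tauto
        · simp [hxs]

theorem addA_eq_dF (pad t : Int) (l : List Int) : ∀ (prev : List Int),
    addA pad t prev l = dF (l.filter (fun s => decide (|s - t| < pad ∧ s ∉ prev))) := by
  induction l with
  | nil => intro prev; simp [addA, dF]
  | cons s r ih =>
      intro prev
      by_cases h : |s - t| < pad ∧ s ∉ prev
      · rw [List.filter_cons_of_pos (by simpa using h), dF_cons]
        simp only [addA, if_pos h, ih]
        congr 2
        rw [List.filter_filter]
        apply List.filter_congr
        intro x _
        by_cases hxs : x = s
        · subst hxs; simp [List.mem_append]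
        · simp [hxs, List.mem_append]
      · rw [List.filter_cons_of_neg (by simpa using h)]
        simp only [addA, if_neg h, ih]

theorem outA_eq_runA (pad : Int) (t1 : List Int) (t2 : List Int) : ∀ (prev : List Int),
    outA pad t1 prev t2 = runA pad (t1.filter (fun s => decide (s ∉ prev))) t2 := by
  induction t2 with
  | nil => intro prev; simp [outA, runA]
  | cons t r ih =>
      intro prev
      rw [outA, runA, ih]
      congr 1
      · rw [addA_eq_dF, List.filter_filter]
        congr 1
        apply List.filter_congr
        intro x _
        rw [Bool.eq_iff_iff]
        simp only [Bool.and_eq_true, decide_eq_true_eq]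
      · congr 1
        rw [List.filter_filter]
        apply List.filter_congr
        intro x hx
        rw [Bool.eq_iff_iff]
        simp only [Bool.and_eq_true, decide_eq_true_eq,
          mem_addA, List.mem_append, not_or]
        constructor
        · intro hnp
          exact ⟨fun hcl => hnp.2 ⟨hx, hcl, hnp.1⟩, hnp.1⟩
        · rintro ⟨hcl, hp⟩
          exact ⟨hp, fun hm => hcl hm.2.1⟩
        

theorem matchA_eq_runA (pad : Int) (t1 : List Int) (t2 : List Int) :
    match_close_times t1 t2 pad = runA pad t1 t2 := by
  have hfun : (fun (st : List (List Int) × List Int) t =>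
      let r := t1.foldl (fun (st2 : List Int × List Int) s =>
          if |s - t| < pad ∧ s ∉ st2.2 then (st2.1 ++ [s], st2.2 ++ [s]) else st2) ([], st.2)
      (st.1 ++ [r.1], r.2))
    = (fun (st : List (List Int) × List Int) t =>
        (st.1 ++ [addA pad t st.2 t1], st.2 ++ addA pad t st.2 t1)) := by
    funext st t
    simp [innerA_char]
  rw [match_close_times, hfun, outerA_char, outA_eq_runA]
  simp

-- ---- B side ----
theorem runA_length (pad : Int) (t2 : List Int) : ∀ (u : List Int),
    (runA pad u t2).length = t2.length := by
  induction t2 with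
  | nil => intro u; simp [runA]
  | cons t r ih => intro u; simp [runA, ih]

theorem runA_nil (pad : Int) (t2 : List Int) :
    runA pad [] t2 = List.replicate t2.length [] := by
  induction t2 with
  | nil => simp [runA]
  | cons t r ih => simp [runA, dF, ih, List.replicate_succ]

theorem runA_cons_none (pad s : Int) (t2 : List Int) :
    t2.findIdx? (fun t => decide (|s - t| < pad)) = none →
    ∀ (v : List Int), runA pad (s :: v) t2 = runA pad v t2 := by
  induction t2 with
  | nil => intro _ v; simp [runA]
  | cons t r ih =>
      intro h v
      rw [List.findIdx?_cons] at h
      by_cases hc : |s - t| < pad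
      · rw [if_pos (decide_eq_true hc)] at h
        exact absurd h (by simp)
      · rw [if_neg (by simp [decide_eq_false hc])] at h
        rw [Option.map_eq_none_iff] at h
        rw [runA, runA, List.filter_cons_of_neg (by simp [decide_eq_false hc]),
          List.filter_cons_of_pos (by simp [hc]), ih h]

theorem filter_comm2 (v : List Int) (p q : Int → Bool) :
    (v.filter p).filter q = (v.filter q).filter p := by
  rw [List.filter_filter, List.filter_filter]
  apply List.filter_congr
  intro a _
  rw [Bool.and_comm]

theorem filter_ne_of_pred (s : Int) (p : Int → Bool) (hps : p s = false) (v : List Int) :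
    (v.filter p).filter (fun x => decide (x ≠ s)) = v.filter p := by
  apply List.filter_eq_self.mpr
  intro a ha
  rw [List.mem_filter] at ha
  by_cases hxs : a = s
  · subst hxs; rw [ha.2] at hps; cases hps
  · simp [hxs]

theorem runA_cons_some (pad s : Int) (t2 : List Int) : ∀ (j : Nat),
    t2.findIdx? (fun t => decide (|s - t| < pad)) = some j →
    ∀ (v : List Int),
      runA pad (s :: v) t2 = (runA pad (v.filter (· ≠ s)) t2).modify j (s :: ·) := by
  induction t2 with
  | nil => intro j h; simp [List.findIdx?_nil] at h
  | cons t r ih =>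
      intro j h v
      rw [List.findIdx?_cons] at h
      by_cases hc : |s - t| < pad
      · rw [if_pos (decide_eq_true hc)] at h
        obtain rfl : (0 : Nat) = j := by simpa using h
        simp only [runA]
        rw [List.modify_zero_cons,
          List.filter_cons_of_pos (by simpa using hc),
          List.filter_cons_of_neg (by simp [hc]), dF_cons]
        rw [filter_comm2 v (fun s_1 => decide (|s_1 - t| < pad)) (fun x => decide (x ≠ s))]
        rw [filter_comm2 v (fun x => decide (x ≠ s)) (fun s_1 => decide (¬|s_1 - t| < pad))]
        rw [filter_ne_of_pred s (fun s_1 => decide (¬|s_1 - t| < pad)) (by simp [hc]) v]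
      · rw [if_neg (by simp [decide_eq_false hc])] at h
        obtain ⟨j', hj', rfl⟩ := Option.map_eq_some_iff.mp h
        simp only [runA]
        rw [List.modify_succ_cons,
          List.filter_cons_of_neg (by simp [hc]),
          List.filter_cons_of_pos (by simp [hc]),
          ih j' hj' (v.filter (fun s_1 => decide (¬|s_1 - t| < pad)))]
        rw [filter_comm2 v (fun x => decide (x ≠ s)) (fun s_1 => decide (|s_1 - t| < pad))]
        rw [filter_ne_of_pred s (fun s_1 => decide (|s_1 - t| < pad)) (by simp [hc]) v]
        rw [filter_comm2 v (fun x => decide (x ≠ s)) (fun s_1 => decide (¬|s_1 - t| < pad))]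

theorem zip_modify (s : Int) : ∀ (bk L : List (List Int)) (j : Nat),
    List.zipWith (· ++ ·) (bk.modify j (· ++ [s])) L
      = List.zipWith (· ++ ·) bk (L.modify j (s :: ·)) := by
  intro bk
  induction bk with
  | nil => intro L j; simp
  | cons b bs ih =>
      intro L j
      cases L with
      | nil => simp
      | cons l ls =>
          cases j with
          | zero => simp [List.modify_zero_cons]
          | succ j' => simp [List.modify_succ_cons, ih]

theorem zip_rep_right : ∀ (bk : List (List Int)) (n : Nat), bk.length = n →
    List.zipWith (· ++ ·) bk (List.replicate n ([] : List Int)) = bk := by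
  intro bk
  induction bk with
  | nil => intro n _; simp
  | cons b bs ih =>
      intro n h
      cases n with
      | zero => simp at h
      | succ m =>
          simp only [List.replicate_succ, List.zipWith_cons_cons, List.append_nil]
          rw [ih m (by simpa using h)]

theorem zip_rep_left : ∀ (L : List (List Int)) (n : Nat), L.length = n →
    List.zipWith (· ++ ·) (List.replicate n ([] : List Int)) L = L := by
  intro L
  induction L with
  | nil => intro n _; simp
  | cons l ls ih =>
      intro n h
      cases n with
      | zero => simp at h
      | succ m =>
          simp only [List.replicate_succ, List.zipWith_cons_cons, List.nil_append]
          rw [ih m (by simpa using h)]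

theorem foldB_char (pad : Int) (t2 : List Int) (u : List Int) :
    ∀ (bk : List (List Int)) (asg : PySem.Set Int), bk.length = t2.length →
    (u.foldl (fun (st : List (List Int) × PySem.Set Int) s =>
        if s ∈ st.2 then st
        else
          match t2.findIdx? (fun t => decide (|s - t| < pad)) with
          | some j => (st.1.modify j (· ++ [s]), PySem.Set.add st.2 s)
          | none => st) (bk, asg)).1
      = List.zipWith (· ++ ·) bk (runA pad (u.filter (fun s => decide (s ∉ asg))) t2) := by
  induction u with
  | nil =>
      intro bk asg h
      rw [List.foldl_nil, List.filter_nil, runA_nil]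
      exact (zip_rep_right bk t2.length h).symm
  | cons s u' ih =>
      intro bk asg h
      rw [List.foldl_cons]
      by_cases hm : s ∈ asg
      · rw [if_pos hm, List.filter_cons_of_neg (by simp [hm])]
        exact ih bk asg h
      · rw [if_neg hm, List.filter_cons_of_pos (by simpa using hm)]
        cases hf : t2.findIdx? (fun t => decide (|s - t| < pad)) with
        | none =>
            rw [ih bk asg h, runA_cons_none pad s t2 hf]
        | some j =>
            have harg : u'.filter (fun s_1 => decide (s_1 ∉ PySem.Set.add asg s))
                = (u'.filter (fun s_1 => decide (s_1 ∉ asg))).filter (· ≠ s) := by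
              rw [List.filter_filter]
              apply List.filter_congr
              intro x _
              by_cases hxs : x = s
              · subst hxs; simp [PySem.Set.mem_add]
              · simp [PySem.Set.mem_add, hxs]
            rw [ih (bk.modify j (· ++ [s])) (PySem.Set.add asg s)
                (by rw [List.length_modify]; exact h),
              harg, runA_cons_some pad s t2 j hf, ← zip_modify]

theorem matchB_eq_runA (pad : Int) (t1 : List Int) (t2 : List Int) :
    match_close_times_alt t1 t2 pad = runA pad t1 t2 := by
  rw [match_close_times_alt,
    foldB_char pad t2 t1 (List.replicate t2.length []) PySem.Set.empty (by simp)]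
  have h1 : t1.filter (fun s => decide (s ∉ PySem.Set.empty)) = t1 := by
    apply List.filter_eq_self.mpr
    intro a _
    simp [PySem.Set.empty]
  rw [h1]
  exact zip_rep_left _ _ (runA_length pad t2 t1)

-- ===== VERDICT (by name: the statement is the Claim_ definition above) =====
theorem match_close_times_spec : Claim_equal_match_close_times := by
  intro t1 t2 pad _
  unfold Spec_match_close_times
  rw [matchA_eq_runA, matchB_eq_runA]
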